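-- pv_equiv track=rewrite | github.com/unitrium/02255-projects | finalProject/Piccolo.py | f
-- ===== SOURCE A (Python) =====
-- Sbox = [0xe, 0x4, 0xb, 0x2, 0x3, 0x8, 0x0, 0x9, 0x1, 0xa, 0x7, 0xf, 0x6, 0xc, 0x5, 0xd]
--
-- M = [
--     [0x2, 0x3, 0x1, 0x1],
--     [0x1, 0x2, 0x3, 0x1],
--     [0x1, 0x1, 0x2, 0x3],
--     [0x3, 0x1, 0x1, 0x2],
-- ]
--
-- def f(b):
--     andbyte = 0xF
--     X = []
--     Y = [0, 0, 0, 0]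
--     ret = []
--     for i in range(4):
--         ind = b >> (4 * (3 - i)) & andbyte
--         X.append(Sbox[ind])
--
--     for i in range(4):
--         Y[i] = (gf(X[0], M[i][0]) ^ gf(X[1], M[i][1]) ^ gf(X[2], M[i][2]) ^ gf(X[3], M[i][3]))
--         ret.append(Sbox[Y[i]])
--
--     return (ret[0] << 12) ^ (ret[1] << 8) ^ (ret[2] << 4) ^ ret[3]
--
-- def gf(a, b):
--     retval = 0
--     while b:
--         if b & 1:
--             retval = retval ^ a
--         a <<= 1
--         if a & 16:
--             a = a ^ 0x13
--         b >>= 1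
--     return retval
-- ===== SOURCE B (Python) =====
-- Sbox = [0xe, 0x4, 0xb, 0x2, 0x3, 0x8, 0x0, 0x9, 0x1, 0xa, 0x7, 0xf, 0x6, 0xc, 0x5, 0xd]
--
--
-- def _xt(x):
--     # multiply by 2 in GF(2^4) with reduction polynomial x^4 + x + 1 (0x13)
--     x <<= 1
--     return x ^ 0x13 if x & 0x10 else x
--
--
-- def f(b):
--     s = [Sbox[(b >> sh) & 0xF] for sh in (12, 8, 4, 0)]
--     t = s[0] ^ s[1] ^ s[2] ^ s[3]
--     out = 0
--     for i in range(4):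
--         y = s[i] ^ t ^ _xt(s[i] ^ s[(i + 1) % 4])
--         out = (out << 4) | Sbox[y]
--     return out
-- ===== Notes on version B (the rewrite author's own statement) =====
-- stated objective: alternative
-- what changed: B drops A's generic bitwise GF-multiply loop and 4x4 matrix scan and instead uses the AES-style xtime identity for the circulant MDS rows - row i equals s_i xor the xor of all four s-box outputs xor xtime of s_i xor its successor - packing the result nibble-by-nibble in a single shift-or pass.
import Mathlib
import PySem

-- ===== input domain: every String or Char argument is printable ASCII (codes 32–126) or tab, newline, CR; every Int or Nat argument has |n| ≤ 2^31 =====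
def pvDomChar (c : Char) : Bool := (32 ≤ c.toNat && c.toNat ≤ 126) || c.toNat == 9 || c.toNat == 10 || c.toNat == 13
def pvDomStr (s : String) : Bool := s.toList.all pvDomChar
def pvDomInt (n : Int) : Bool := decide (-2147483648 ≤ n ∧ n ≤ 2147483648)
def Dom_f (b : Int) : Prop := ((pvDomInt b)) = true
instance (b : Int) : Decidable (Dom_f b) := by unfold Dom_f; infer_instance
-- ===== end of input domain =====

-- B replaces A's generic GF(2^4) multiply-loop and matrix scan by the AES-style
-- xtime trick for the circulant (2,3,1,1) row, packing the output in one pass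
-- (objective: simpler/alternative; return value only, no mutation involved).

-- ===== PORT A =====
def pySbox : List Int := [0xe, 0x4, 0xb, 0x2, 0x3, 0x8, 0x0, 0x9, 0x1, 0xa, 0x7, 0xf, 0x6, 0xc, 0x5, 0xd]

def pyM : List (List Int) := [[0x2, 0x3, 0x1, 0x1], [0x1, 0x2, 0x3, 0x1], [0x1, 0x1, 0x2, 0x3], [0x3, 0x1, 0x1, 0x2]]

-- while b: … — fuel = b.natAbs + 1 steps suffice since b is halved each turn
-- (a guard making the same computation total; gf is only called with b ∈ {1,2,3})
def gfAux : Nat → Int → Int → Int → Int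
  | 0, _, _, retval => retval
  | fuel + 1, a, b, retval =>
    if b ≠ 0 then
      let retval := if PySem.Int.band b 1 ≠ 0 then PySem.Int.bxor retval a else retval
      let a := a <<< 1
      let a := if PySem.Int.band a 16 ≠ 0 then PySem.Int.bxor a 0x13 else a
      gfAux fuel a (b >>> 1) retval
    else retval

def gf (a b : Int) : Int := gfAux (b.natAbs + 1) a b 0

-- shift amount 4*(3-i) is a nonnegative literal for i ∈ range(4), so .toNat is exact
def f (b : Int) : Int :=
  let X : List Int := (PySem.List.pyRange 0 4 1).foldl (fun X i =>
    X ++ [PySem.List.pyGetD pySbox (PySem.Int.band (b >>> (4 * (3 - i)).toNat) 0xF) 0]) []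
  let ret : List Int := (PySem.List.pyRange 0 4 1).foldl (fun ret i =>
    let Yi := PySem.Int.bxor (PySem.Int.bxor (PySem.Int.bxor
        (gf (PySem.List.pyGetD X 0 0) (PySem.List.pyGetD (PySem.List.pyGetD pyM i []) 0 0))
        (gf (PySem.List.pyGetD X 1 0) (PySem.List.pyGetD (PySem.List.pyGetD pyM i []) 1 0)))
        (gf (PySem.List.pyGetD X 2 0) (PySem.List.pyGetD (PySem.List.pyGetD pyM i []) 2 0)))
        (gf (PySem.List.pyGetD X 3 0) (PySem.List.pyGetD (PySem.List.pyGetD pyM i []) 3 0))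
    ret ++ [PySem.List.pyGetD pySbox Yi 0]) []
  PySem.Int.bxor (PySem.Int.bxor (PySem.Int.bxor
    ((PySem.List.pyGetD ret 0 0) <<< 12)
    ((PySem.List.pyGetD ret 1 0) <<< 8))
    ((PySem.List.pyGetD ret 2 0) <<< 4))
    (PySem.List.pyGetD ret 3 0)

-- ===== PORT B =====
def pySboxB : List Int := [0xe, 0x4, 0xb, 0x2, 0x3, 0x8, 0x0, 0x9, 0x1, 0xa, 0x7, 0xf, 0x6, 0xc, 0x5, 0xd]

def xt (x : Int) : Int :=
  let x := x <<< 1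
  if PySem.Int.band x 0x10 ≠ 0 then PySem.Int.bxor x 0x13 else x

def f_alt (b : Int) : Int :=
  let s : List Int := ([12, 8, 4, 0] : List Nat).map (fun sh =>
    PySem.List.pyGetD pySboxB (PySem.Int.band (b >>> sh) 0xF) 0)
  let t := PySem.Int.bxor (PySem.Int.bxor (PySem.Int.bxor
    (PySem.List.pyGetD s 0 0) (PySem.List.pyGetD s 1 0)) (PySem.List.pyGetD s 2 0)) (PySem.List.pyGetD s 3 0)
  (PySem.List.pyRange 0 4 1).foldl (fun out i =>
    let y := PySem.Int.bxor (PySem.Int.bxor (PySem.List.pyGetD s i 0) t)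
      (xt (PySem.Int.bxor (PySem.List.pyGetD s i 0) (PySem.List.pyGetD s (PySem.Int.mod (i + 1) 4) 0)))
    PySem.Int.bor (out <<< 4) (PySem.List.pyGetD pySboxB y 0)) 0

-- ===== PRECONDITION & SPEC =====
def Spec_f (b : Int) (out : Int) : Prop := out = f_alt b
instance (b : Int) (out : Int) : Decidable (Spec_f b out) := by unfold Spec_f; infer_instance

-- ===== CLAIM (what is proved, stated in full; the proofs are below) =====
def Claim_equal_f : Prop := ∀ (b : Int), Dom_f b → Spec_f b (f b)

-- ===== LEMMAS AND PROOFS =====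

-- proof-side helpers: both ports factor through the four masked nibbles
def lkA (v : Int) : Int := PySem.List.pyGetD pySbox v 0
def lkB (v : Int) : Int := PySem.List.pyGetD pySboxB v 0

def FA (v0 v1 v2 v3 : Int) : Int :=
  let X : List Int := [lkA v0, lkA v1, lkA v2, lkA v3]
  let ret : List Int := (PySem.List.pyRange 0 4 1).foldl (fun ret i =>
    let Yi := PySem.Int.bxor (PySem.Int.bxor (PySem.Int.bxor
        (gf (PySem.List.pyGetD X 0 0) (PySem.List.pyGetD (PySem.List.pyGetD pyM i []) 0 0))
        (gf (PySem.List.pyGetD X 1 0) (PySem.List.pyGetD (PySem.List.pyGetD pyM i []) 1 0)))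
        (gf (PySem.List.pyGetD X 2 0) (PySem.List.pyGetD (PySem.List.pyGetD pyM i []) 2 0)))
        (gf (PySem.List.pyGetD X 3 0) (PySem.List.pyGetD (PySem.List.pyGetD pyM i []) 3 0))
    ret ++ [PySem.List.pyGetD pySbox Yi 0]) []
  PySem.Int.bxor (PySem.Int.bxor (PySem.Int.bxor
    ((PySem.List.pyGetD ret 0 0) <<< 12)
    ((PySem.List.pyGetD ret 1 0) <<< 8))
    ((PySem.List.pyGetD ret 2 0) <<< 4))
    (PySem.List.pyGetD ret 3 0)

def FB (v0 v1 v2 v3 : Int) : Int :=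
  let s : List Int := [lkB v0, lkB v1, lkB v2, lkB v3]
  let t := PySem.Int.bxor (PySem.Int.bxor (PySem.Int.bxor
    (PySem.List.pyGetD s 0 0) (PySem.List.pyGetD s 1 0)) (PySem.List.pyGetD s 2 0)) (PySem.List.pyGetD s 3 0)
  (PySem.List.pyRange 0 4 1).foldl (fun out i =>
    let y := PySem.Int.bxor (PySem.Int.bxor (PySem.List.pyGetD s i 0) t)
      (xt (PySem.Int.bxor (PySem.List.pyGetD s i 0) (PySem.List.pyGetD s (PySem.Int.mod (i + 1) 4) 0)))
    PySem.Int.bor (out <<< 4) (PySem.List.pyGetD pySboxB y 0)) 0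

lemma pyRange04 : PySem.List.pyRange 0 4 1 = [0, 1, 2, 3] := by decide

lemma f_eq_FA (b : Int) :
    f b = FA (PySem.Int.band (b >>> 12) 0xF) (PySem.Int.band (b >>> 8) 0xF)
             (PySem.Int.band (b >>> 4) 0xF) (PySem.Int.band (b >>> 0) 0xF) := by
  simp only [f, FA, lkA, pyRange04, List.foldl_cons, List.foldl_nil]
  norm_num

lemma f_alt_eq_FB (b : Int) :
    f_alt b = FB (PySem.Int.band (b >>> 12) 0xF) (PySem.Int.band (b >>> 8) 0xF)
                 (PySem.Int.band (b >>> 4) 0xF) (PySem.Int.band (b >>> 0) 0xF) := by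
  simp only [f_alt, FB, lkB, pyRange04, List.foldl_cons, List.foldl_nil]
  norm_num

lemma band15_bounds (x : Int) : 0 ≤ PySem.Int.band x 15 ∧ PySem.Int.band x 15 < 16 := by
  unfold PySem.Int.band
  have ht : (15 : Int).toNat = 15 := rfl
  rw [ht]
  split_ifs with h1 h2 h3 <;> try omega
  have := Nat.and_le_right (n := x.toNat) (m := 15); omega

lemma pg0 (a b c d : Int) : PySem.List.pyGetD [a,b,c,d] 0 0 = a := by simp [pysem]
lemma pg1 (a b c d : Int) : PySem.List.pyGetD [a,b,c,d] 1 0 = b := by simp [pysem]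
lemma pg2 (a b c d : Int) : PySem.List.pyGetD [a,b,c,d] 2 0 = c := by simp [pysem]
lemma pg3 (a b c d : Int) : PySem.List.pyGetD [a,b,c,d] 3 0 = d := by simp [pysem]
lemma pgM0 : PySem.List.pyGetD pyM 0 [] = [2,3,1,1] := by decide
lemma pgM1 : PySem.List.pyGetD pyM 1 [] = [1,2,3,1] := by decide
lemma pgM2 : PySem.List.pyGetD pyM 2 [] = [1,1,2,3] := by decide
lemma pgM3 : PySem.List.pyGetD pyM 3 [] = [3,1,1,2] := by decide
lemma md0 : PySem.Int.mod (0+1) 4 = 1 := by decide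
lemma md1 : PySem.Int.mod (1+1) 4 = 2 := by decide
lemma md2 : PySem.Int.mod (2+1) 4 = 3 := by decide
lemma md3 : PySem.Int.mod (3+1) 4 = 0 := by decide

def lkF (v : Fin 16) : Fin 16 := ⟨([14,4,11,2,3,8,0,9,1,10,7,15,6,12,5,13].getD v.val 0) % 16, Nat.mod_lt _ (by norm_num)⟩
def xtF (m : Fin 16) : Fin 16 := ⟨(if m.val < 8 then 2*m.val else (2*m.val) ^^^ 19) % 16, Nat.mod_lt _ (by norm_num)⟩
def finXor (a b : Fin 16) : Fin 16 := ⟨(a.val ^^^ b.val) % 16, Nat.mod_lt _ (by norm_num)⟩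

lemma D1 : ∀ v : Fin 16, PySem.List.pyGetD pySbox ((v : Nat) : Int) 0 = ((lkF v : Nat) : Int) := by decide
lemma D1b : ∀ v : Fin 16, PySem.List.pyGetD pySboxB ((v : Nat) : Int) 0 = ((lkF v : Nat) : Int) := by decide
lemma D2 : ∀ m : Fin 16, gf ((m : Nat) : Int) 1 = ((m : Nat) : Int) := by decide
lemma D3 : ∀ m : Fin 16, gf ((m : Nat) : Int) 2 = ((xtF m : Nat) : Int) := by decide
lemma D4 : ∀ m : Fin 16, gf ((m : Nat) : Int) 3 = ((finXor m (xtF m) : Nat) : Int) := by decide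
lemma D5 : ∀ m : Fin 16, xt ((m : Nat) : Int) = ((xtF m : Nat) : Int) := by decide
lemma D6 : ∀ a b : Fin 16, PySem.Int.bxor ((a : Nat) : Int) ((b : Nat) : Int) = ((finXor a b : Nat) : Int) := by decide
lemma D7 : ∀ a b : Fin 16, xtF (finXor a b) = finXor (xtF a) (xtF b) := by decide
lemma fx_comm : ∀ a b : Fin 16, finXor a b = finXor b a := by decide
lemma fx_assoc : ∀ a b c : Fin 16, finXor (finXor a b) c = finXor a (finXor b c) := by decide
lemma fx_left_comm (a b c : Fin 16) : finXor a (finXor b c) = finXor b (finXor a c) := by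
  rw [← fx_assoc, fx_comm a b, fx_assoc]
lemma fx_self : ∀ a : Fin 16, finXor a a = 0 := by decide
lemma fx_cancel_left : ∀ a b : Fin 16, finXor a (finXor a b) = b := by decide
lemma fx_zero_right : ∀ a : Fin 16, finXor a 0 = a := by decide
lemma borz : ∀ a : Fin 16, PySem.Int.bor ((0:Int) <<< 4) ((a : Nat) : Int) = ((a : Nat) : Int) := by decide

lemma natOrAdd (x b k : Nat) (h : b < 2^k) : (x * 2^k) ||| b = x * 2^k + b := by
  rw [← Nat.shiftLeft_eq]
  exact (Nat.shiftLeft_add_eq_or_of_lt h x).symm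

lemma natXorAdd (x b k : Nat) (h : b < 2^k) : (x * 2^k) ^^^ b = x * 2^k + b := by
  rw [← natOrAdd x b k h]
  apply Nat.eq_of_testBit_eq
  intro i
  by_cases hik : k ≤ i
  · have hb : b.testBit i = false := by
      apply Nat.testBit_eq_false_of_lt
      exact lt_of_lt_of_le h (Nat.pow_le_pow_right (by norm_num) hik)
    simp [Nat.testBit_xor, Nat.testBit_or, hb]
  · have hx : (x * 2^k).testBit i = false := by
      rw [← Nat.shiftLeft_eq, Nat.testBit_shiftLeft]
      simp [hik]
    simp [Nat.testBit_xor, Nat.testBit_or, hx]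

lemma castShl12 (n : Nat) : ((n : Int) <<< (12 : Int)) = ((n <<< 12 : Nat) : Int) := rfl
lemma castShl8 (n : Nat) : ((n : Int) <<< (8 : Int)) = ((n <<< 8 : Nat) : Int) := rfl
lemma castShl4 (n : Nat) : ((n : Int) <<< (4 : Int)) = ((n <<< 4 : Nat) : Int) := rfl

lemma packF (r0 r1 r2 r3 : Fin 16) :
    PySem.Int.bxor (PySem.Int.bxor (PySem.Int.bxor (((r0 : Nat) : Int) <<< 12) (((r1 : Nat) : Int) <<< 8))
        (((r2 : Nat) : Int) <<< 4)) ((r3 : Nat) : Int)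
    = PySem.Int.bor ((PySem.Int.bor ((PySem.Int.bor (((r0 : Nat) : Int) <<< 4) ((r1 : Nat) : Int)) <<< 4)
        ((r2 : Nat) : Int)) <<< 4) ((r3 : Nat) : Int) := by
  obtain ⟨a, ha⟩ := r0
  obtain ⟨b, hb⟩ := r1
  obtain ⟨c, hc⟩ := r2
  obtain ⟨d, hd⟩ := r3
  simp only [castShl12, castShl8, castShl4, PySem.Int.bxor_natCast, PySem.Int.bor_natCast,
    Nat.cast_inj]
  have hx4 : ∀ x : Nat, x <<< 4 = x * 16 := fun x => by simp [Nat.shiftLeft_eq]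
  have hx8 : ∀ x : Nat, x <<< 8 = x * 256 := fun x => by simp [Nat.shiftLeft_eq]
  have hx12 : ∀ x : Nat, x <<< 12 = x * 4096 := fun x => by simp [Nat.shiftLeft_eq]
  have X12 : ∀ x e : Nat, e < 4096 → (x * 4096) ^^^ e = x * 4096 + e := by
    intro x e he
    have h := natXorAdd x e 12 (by omega)
    simpa [show (2:Nat)^12 = 4096 by norm_num] using h
  have X8 : ∀ x e : Nat, e < 256 → (x * 256) ^^^ e = x * 256 + e := by
    intro x e he
    have h := natXorAdd x e 8 (by omega)
    simpa [show (2:Nat)^8 = 256 by norm_num] using h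
  have X4 : ∀ x e : Nat, e < 16 → (x * 16) ^^^ e = x * 16 + e := by
    intro x e he
    have h := natXorAdd x e 4 (by omega)
    simpa [show (2:Nat)^4 = 16 by norm_num] using h
  have O4 : ∀ x e : Nat, e < 16 → (x * 16) ||| e = x * 16 + e := by
    intro x e he
    have h := natOrAdd x e 4 (by omega)
    simpa [show (2:Nat)^4 = 16 by norm_num] using h
  simp only [hx4, hx8, hx12]
  rw [show a * 4096 ^^^ b * 256 = a * 4096 + b * 256 from X12 a _ (by omega)]
  rw [show a * 4096 + b * 256 = (a * 16 + b) * 256 by ring]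
  rw [show (a * 16 + b) * 256 ^^^ c * 16 = (a * 16 + b) * 256 + c * 16 from X8 _ _ (by omega)]
  rw [show (a * 16 + b) * 256 + c * 16 = ((a * 16 + b) * 16 + c) * 16 by ring]
  rw [show ((a * 16 + b) * 16 + c) * 16 ^^^ d = ((a * 16 + b) * 16 + c) * 16 + d from X4 _ _ (by omega)]
  rw [show a * 16 ||| b = a * 16 + b from O4 a b (by omega)]
  rw [show (a * 16 + b) * 16 ||| c = (a * 16 + b) * 16 + c from O4 _ c (by omega)]
  rw [show ((a * 16 + b) * 16 + c) * 16 ||| d = ((a * 16 + b) * 16 + c) * 16 + d from O4 _ d (by omega)]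

set_option maxHeartbeats 1000000 in
lemma key (n0 n1 n2 n3 : Fin 16) :
    FA ((n0:Nat):Int) ((n1:Nat):Int) ((n2:Nat):Int) ((n3:Nat):Int)
    = FB ((n0:Nat):Int) ((n1:Nat):Int) ((n2:Nat):Int) ((n3:Nat):Int) := by
  simp only [FA, FB, lkA, lkB, pyRange04, List.foldl_cons, List.foldl_nil, 
    List.nil_append, List.cons_append]
  simp only [md0, md1, md2, md3, pgM0, pgM1, pgM2, pgM3, pg0, pg1, pg2, pg3]
  simp only [D1, D1b, D2, D3, D4, D5, D6]
  simp only [D7, fx_comm, fx_assoc, fx_left_comm, fx_self, fx_cancel_left, fx_zero_right]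
  simp only [borz]
  exact packF _ _ _ _

-- ===== VERDICT (by name: the statement is the Claim_ definition above) =====
theorem f_spec : Claim_equal_f := by
  intro b _
  unfold Spec_f
  rw [f_eq_FA, f_alt_eq_FB]
  have h12 := band15_bounds (b >>> 12)
  have h8 := band15_bounds (b >>> 8)
  have h4 := band15_bounds (b >>> 4)
  have h0 := band15_bounds (b >>> 0)
  have e12 : PySem.Int.band (b >>> 12) 0xF = (((⟨(PySem.Int.band (b >>> 12) 0xF).toNat, by omega⟩ : Fin 16) : Nat) : Int) := by
    simp; omega
  have e8 : PySem.Int.band (b >>> 8) 0xF = (((⟨(PySem.Int.band (b >>> 8) 0xF).toNat, by omega⟩ : Fin 16) : Nat) : Int) := by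
    simp; omega
  have e4 : PySem.Int.band (b >>> 4) 0xF = (((⟨(PySem.Int.band (b >>> 4) 0xF).toNat, by omega⟩ : Fin 16) : Nat) : Int) := by
    simp; omega
  have e0 : PySem.Int.band (b >>> 0) 0xF = (((⟨(PySem.Int.band (b >>> 0) 0xF).toNat, by omega⟩ : Fin 16) : Nat) : Int) := by
    simp; omega
  rw [e12, e8, e4, e0]
  exact key _ _ _ _
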